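-- pv_equiv track=rewrite | github.com/zaidsaeed/Personal-Projects | Basic Practice with if statements.py | stranger_things
-- ===== SOURCE A (Python) =====
-- def stranger_things(l1,l2):
--     '''(List, List) --> (Boolean) This function compares two given lists to see if their even ranked elements (including zero) are equal and if their odd ranked elements are different.'''
--     if len(l1) == len(l2):
--          for i in range (0, len(l1)):
--              if i%2 == 0 and l1[i] != l2[i]:
--                  return False
--              elif i%2 != 0 and l1[i] == l2[i]:
--                  return False
--          return True
--     else:
--         return False
-- ===== SOURCE B (Python) =====
-- def stranger_things(l1, l2):
--     '''Same comparison, decomposed as pairwise structural recursion two elements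
--     at a time (even/odd pair) instead of an index loop with modulo branching.'''
--     if len(l1) != len(l2):
--         return False
--
--     def go(xs, ys):
--         if len(xs) >= 2:
--             return xs[0] == ys[0] and xs[1] != ys[1] and go(xs[2:], ys[2:])
--         if len(xs) == 1:
--             return xs[0] == ys[0]
--         return True
--
--     return go(l1, l2)
-- ===== Notes on version B (the rewrite author's own statement) =====
-- stated objective: alternative
-- what changed: Replaced the single index loop with modulo-parity branching by a structural recursion that consumes the two lists two elements at a time (even element must be equal, odd element must differ), with no indices or modulo at all.
import Mathlib
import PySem

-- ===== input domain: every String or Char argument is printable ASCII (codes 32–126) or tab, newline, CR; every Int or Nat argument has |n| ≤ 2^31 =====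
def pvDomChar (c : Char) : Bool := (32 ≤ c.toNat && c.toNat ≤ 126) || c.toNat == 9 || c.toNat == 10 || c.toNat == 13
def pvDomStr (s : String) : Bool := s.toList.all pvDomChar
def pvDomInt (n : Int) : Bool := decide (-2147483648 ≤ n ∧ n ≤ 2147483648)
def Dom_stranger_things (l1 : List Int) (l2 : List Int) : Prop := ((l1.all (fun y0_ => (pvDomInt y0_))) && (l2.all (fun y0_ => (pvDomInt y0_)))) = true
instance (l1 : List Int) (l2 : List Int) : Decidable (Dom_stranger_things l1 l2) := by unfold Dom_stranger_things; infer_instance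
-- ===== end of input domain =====

-- B replaces the parity-branched index loop by a two-at-a-time structural recursion (objective: alternative decomposition).

-- ===== PORT A =====
-- the 'for i in range(0, len(l1))' body with its two early 'return False' branches
def strangerLoop (l1 l2 : List Int) : List Int → Bool
  | [] => true
  | i :: rest =>
    if PySem.Int.mod i 2 == 0 && PySem.List.pyGetD l1 i 0 != PySem.List.pyGetD l2 i 0 then false
    else if PySem.Int.mod i 2 != 0 && PySem.List.pyGetD l1 i 0 == PySem.List.pyGetD l2 i 0 then false
    else strangerLoop l1 l2 rest

def stranger_things (l1 : List Int) (l2 : List Int) : Bool :=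
  if l1.length == l2.length then
    strangerLoop l1 l2 (PySem.List.pyRange 0 (l1.length : Int) 1)
  else false

-- ===== PORT B =====
-- Source B's helper 'go': even element equal, odd element different, recurse on the tails
def altGo : List Int → List Int → Bool
  | x :: x' :: xs, y :: y' :: ys => x == y && x' != y' && altGo xs ys
  | [x], y :: _ => x == y
  | _, _ => true

def stranger_things_alt (l1 : List Int) (l2 : List Int) : Bool :=
  if l1.length != l2.length then false else altGo l1 l2

-- ===== PRECONDITION & SPEC =====
def Spec_stranger_things (l1 : List Int) (l2 : List Int) (out : Bool) : Prop := out = stranger_things_alt l1 l2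
instance (l1 : List Int) (l2 : List Int) (out : Bool) : Decidable (Spec_stranger_things l1 l2 out) := by unfold Spec_stranger_things; infer_instance

-- ===== CLAIM (what is proved, stated in full; the proofs are below) =====
def Claim_equal_stranger_things : Prop := ∀ (l1 : List Int) (l2 : List Int), Dom_stranger_things l1 l2 → Spec_stranger_things l1 l2 (stranger_things l1 l2)

-- ===== LEMMAS AND PROOFS =====

theorem getD_append_self (p t : List Int) (x d : Int) : (p ++ x :: t).getD p.length d = x := by
  induction p with
  | nil => rfl
  | cons a p ih => simp

-- invariant of A's loop: with an even number of already-checked elements in front,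
-- the remaining index range computes exactly B's two-at-a-time recursion
theorem strangerLoop_pre : ∀ (xs ys p q : List Int), xs.length = ys.length → p.length = q.length → p.length % 2 = 0 →
    strangerLoop (p ++ xs) (q ++ ys) (PySem.List.pyRange (p.length : Int) ((p.length : Int) + (xs.length : Int)) 1) = altGo xs ys
  | [], ys, p, q, h, hp, he => by
      have hy : ys = [] := by cases ys <;> simp_all
      subst hy
      simp [PySem.List.pyRange_one_eq_nil, strangerLoop, altGo]
  | [x], ys, p, q, h, hp, he => by
      match ys, h with
      | [y], _ =>
        have hmod : PySem.Int.mod (p.length : Int) 2 = 0 := by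
          rw [PySem.Int.mod_eq_emod_of_pos (by omega)]; omega
        have hg1 : PySem.List.pyGetD (p ++ [x]) (p.length : Int) 0 = x := by
          rw [PySem.List.pyGetD_natCast, getD_append_self]
        have hg2 : PySem.List.pyGetD (q ++ [y]) (p.length : Int) 0 = y := by
          rw [PySem.List.pyGetD_natCast, hp, getD_append_self]
        have hr : PySem.List.pyRange (p.length : Int) ((p.length : Int) + ((([x] : List Int).length : Nat) : Int)) 1 = [(p.length : Int)] := by
          have h1 : ((([x] : List Int).length : Nat) : Int) = 1 := by simp
          rw [h1]; exact PySem.List.pyRange_one_singleton _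
        rw [hr]
        simp only [strangerLoop, altGo]
        rw [hmod, hg1, hg2]
        by_cases hxy : x = y
        · simp [hxy]
        · simp [hxy]
  | x :: x' :: xs', ys, p, q, h, hp, he => by
      match ys, h with
      | y :: y' :: ys', h =>
        have hlen : xs'.length = ys'.length := by simpa using h
        have hmod : PySem.Int.mod (p.length : Int) 2 = 0 := by
          rw [PySem.Int.mod_eq_emod_of_pos (by omega)]; omega
        have hmod1 : PySem.Int.mod ((p.length : Int) + 1) 2 = 1 := by
          rw [PySem.Int.mod_eq_emod_of_pos (by omega)]; omega
        have e1 : p ++ x :: x' :: xs' = (p ++ [x]) ++ x' :: xs' := by simp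
        have e2 : q ++ y :: y' :: ys' = (q ++ [y]) ++ y' :: ys' := by simp
        have e3 : p ++ x :: x' :: xs' = (p ++ [x, x']) ++ xs' := by simp
        have e4 : q ++ y :: y' :: ys' = (q ++ [y, y']) ++ ys' := by simp
        have hg1 : PySem.List.pyGetD (p ++ x :: x' :: xs') (p.length : Int) 0 = x := by
          rw [PySem.List.pyGetD_natCast, getD_append_self]
        have hg2 : PySem.List.pyGetD (q ++ y :: y' :: ys') (p.length : Int) 0 = y := by
          rw [PySem.List.pyGetD_natCast, hp, getD_append_self]
        have hg3 : PySem.List.pyGetD (p ++ x :: x' :: xs') ((p.length : Int) + 1) 0 = x' := by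
          have : ((p.length : Int) + 1) = (((p ++ [x]).length : Nat) : Int) := by simp
          rw [this, PySem.List.pyGetD_natCast, e1, getD_append_self]
        have hg4 : PySem.List.pyGetD (q ++ y :: y' :: ys') ((p.length : Int) + 1) 0 = y' := by
          have : ((p.length : Int) + 1) = (((q ++ [y]).length : Nat) : Int) := by simp [hp]
          rw [this, PySem.List.pyGetD_natCast, e2, getD_append_self]
        have hr1 : PySem.List.pyRange (p.length : Int) ((p.length : Int) + ((x :: x' :: xs').length : Int)) 1
            = (p.length : Int) :: ((p.length : Int) + 1) :: PySem.List.pyRange ((p.length : Int) + 2) ((p.length : Int) + ((x :: x' :: xs').length : Int)) 1 := by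
          rw [PySem.List.pyRange_one_cons (by simp only [List.length_cons]; push_cast; omega),
             PySem.List.pyRange_one_cons (by simp only [List.length_cons]; push_cast; omega),
             show ((p.length : Int) + 1 + 1) = (p.length : Int) + 2 from by ring]
        have hrec := strangerLoop_pre xs' ys' (p ++ [x, x']) (q ++ [y, y']) hlen (by simp [hp]) (by simp; omega)
        have hreq : ((p ++ [x, x']).length : Int) = (p.length : Int) + 2 := by simp
        have hrb : ((p.length : Int) + 2) + (xs'.length : Int) = (p.length : Int) + ((x :: x' :: xs').length : Int) := by
          simp; ring
        rw [hreq, hrb, ← e3, ← e4] at hrec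
        rw [hr1]
        simp only [strangerLoop, altGo]
        rw [hmod, hmod1, hg1, hg2, hg3, hg4, hrec]
        by_cases hxy : x = y
        · by_cases hxy' : x' = y'
          · simp [hxy, hxy']
          · simp [hxy, hxy']
        · simp [hxy]

-- ===== VERDICT (by name: the statement is the Claim_ definition above) =====
theorem stranger_things_spec : Claim_equal_stranger_things := by
  intro l1 l2 _
  unfold Spec_stranger_things stranger_things stranger_things_alt
  by_cases h : l1.length = l2.length
  · simp only [h, beq_self_eq_true, if_true, bne_self_eq_false, Bool.false_eq_true, if_false]
    have := strangerLoop_pre l1 l2 [] [] h rfl rfl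
    simpa [h] using this
  · simp [h, bne, Ne.symm]
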